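-- pv_equiv track=rewrite | github.com/km1994/leetcode | topic23_math/LCP17_calculate/interview.py | calculate
-- ===== SOURCE A (Python) =====
-- def calculate(s: str) -> int:
--     funA = lambda x,y:2*x+y
--     funB = lambda x,y:2*y+x
--     funC = lambda x,y:x+y
--     x = 1
--     y = 0
--     for c in s:
--         if c=="A":
--             x=funA(x,y)
--         elif c=="B":
--             y=funB(x,y)
--     return funC(x,y)
-- ===== SOURCE B (Python) =====
-- def calculate(s: str) -> int:
--     return 2 ** (s.count('A') + s.count('B'))
-- ===== Notes on version B (the rewrite author's own statement) =====
-- stated objective: faster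
-- what changed: Replaced the stateful (x,y) simulation loop and lambdas with the closed form 2 ** (number of 'A' and 'B' characters), using the invariant that x+y doubles on each A/B step.
import Mathlib
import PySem

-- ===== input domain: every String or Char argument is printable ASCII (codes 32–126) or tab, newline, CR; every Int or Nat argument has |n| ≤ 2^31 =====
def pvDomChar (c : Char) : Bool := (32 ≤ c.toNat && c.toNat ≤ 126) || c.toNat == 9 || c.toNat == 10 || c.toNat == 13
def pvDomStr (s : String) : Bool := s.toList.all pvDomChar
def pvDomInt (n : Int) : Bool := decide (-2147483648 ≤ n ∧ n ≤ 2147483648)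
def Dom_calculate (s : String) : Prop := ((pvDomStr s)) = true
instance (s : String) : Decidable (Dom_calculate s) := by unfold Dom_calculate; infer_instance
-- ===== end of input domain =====

-- B replaces A's stateful simulation loop by the closed form 2^(#'A' + #'B'); objective: simpler.

-- ===== PORT A =====
def calculate (s : String) : Int :=
  let funA := fun (x y : Int) => 2 * x + y
  let funB := fun (x y : Int) => 2 * y + x
  let funC := fun (x y : Int) => x + y
  let st := s.toList.foldl (fun (p : Int × Int) c =>
    if c = 'A' then (funA p.1 p.2, p.2)
    else if c = 'B' then (p.1, funB p.1 p.2)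
    else p) (1, 0)
  funC st.1 st.2

-- ===== PORT B =====
def calculate_alt (s : String) : Int :=
  (2 : Int) ^ (PySem.Str.count s "A" + PySem.Str.count s "B")

-- ===== PRECONDITION & SPEC =====
def Spec_calculate (s : String) (out : Int) : Prop := out = calculate_alt s
instance (s : String) (out : Int) : Decidable (Spec_calculate s out) := by unfold Spec_calculate; infer_instance

-- ===== CLAIM (what is proved, stated in full; the proofs are below) =====
def Claim_equal_calculate : Prop := ∀ (s : String), Dom_calculate s → Spec_calculate s (calculate s)

-- ===== LEMMAS AND PROOFS =====

-- single-character substring count equals element count (unfolds PySem.Chars.count.go)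
theorem count_go_single (a : Char) : ∀ (t : List Char) (k : Nat),
    PySem.Chars.count.go [a] t.length t k = k + t.count a := by
  intro t
  induction t with
  | nil => intro k; simp [PySem.Chars.count.go]
  | cons c t ih =>
    intro k
    rw [PySem.Chars.count.go.eq_def]
    simp only [List.length_cons, List.isPrefixOf, List.count_cons]
    by_cases h : c = a
    · simp [h, ih]; omega
    · simp [h, Ne.symm h, ih, beq_iff_eq]

theorem count_single (a : Char) (l : List Char) : PySem.Chars.count l [a] = l.count a := by
  simpa [PySem.Chars.count] using count_go_single a l 0

-- the loop invariant: x + y doubles on each 'A' or 'B', is untouched otherwise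
theorem loop_sum (l : List Char) : ∀ x y : Int,
    (l.foldl (fun (p : Int × Int) c =>
      if c = 'A' then (2 * p.1 + p.2, p.2)
      else if c = 'B' then (p.1, 2 * p.2 + p.1)
      else p) (x, y)).1 +
    (l.foldl (fun (p : Int × Int) c =>
      if c = 'A' then (2 * p.1 + p.2, p.2)
      else if c = 'B' then (p.1, 2 * p.2 + p.1)
      else p) (x, y)).2
    = (x + y) * 2 ^ (l.count 'A' + l.count 'B') := by
  induction l with
  | nil => intro x y; simp
  | cons c t ih =>
    intro x y
    by_cases hA : c = 'A'
    · subst hA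
      simp only [List.foldl_cons, if_pos rfl, List.count_cons]
      rw [ih]
      simp
      ring
    · by_cases hB : c = 'B'
      · subst hB
        simp only [List.foldl_cons, List.count_cons]
        rw [if_neg hA]
        simp only [if_true]
        rw [ih]
        simp
        ring
      · simp only [List.foldl_cons, List.count_cons, if_neg hA, if_neg hB]
        rw [ih]
        simp [hA, hB]

-- ===== VERDICT (by name: the statement is the Claim_ definition above) =====
theorem calculate_spec : Claim_equal_calculate := by
  intro s _
  unfold Spec_calculate calculate calculate_alt
  simp only [PySem.Str.count_eq]
  rw [loop_sum s.toList 1 0]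
  rw [show ("A" : String).toList = ['A'] from rfl, show ("B" : String).toList = ['B'] from rfl,
     count_single, count_single]
  push_cast
  ring
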